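-- pv_equiv track=rewrite | github.com/himanshuparhi4-droid/ai-resume-analyzer | backend/app/services/nlp/skill_grounding.py | _build_baseline_skill_profiles
-- ===== SOURCE A (Python) =====
-- def _build_baseline_skill_profiles(skills: list[str]) -> list[list[str]]:
--     ordered = list(dict.fromkeys(skills))
--     if not ordered:
--         return [[], [], []]
--     if len(ordered) <= 3:
--         return [ordered, ordered, ordered]
--
--     profiles = [[], [], []]
--     for index, skill in enumerate(ordered):
--         if index == 0:
--             target_profiles = (0, 1, 2)
--         elif index in (1, 2):
--             target_profiles = (0, 1)
--         elif index in (3, 4):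
--             target_profiles = (0, 2)
--         else:
--             target_profiles = (2,)
--         for profile_index in target_profiles:
--             profiles[profile_index].append(skill)
--
--     return [profile or ordered[: min(len(ordered), 4)] for profile in profiles]
-- ===== SOURCE B (Python) =====
-- def _build_baseline_skill_profiles(skills: list[str]) -> list[list[str]]:
--     ordered = []
--     seen = set()
--     for s in skills:
--         if s not in seen:
--             seen.add(s)
--             ordered.append(s)
--     if not ordered:
--         return [[], [], []]
--     if len(ordered) <= 3:
--         return [ordered, ordered, ordered]
--     return [ordered[:5], ordered[:3], [ordered[0]] + ordered[3:]]
-- ===== Notes on version B (the rewrite author's own statement) =====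
-- stated objective: simpler
-- what changed: Replaces the per-index dispatch loop appending into three profile lists (and the dead 'profile or ...' fallback) with three direct slices of the deduplicated list: ordered[:5], ordered[:3], [ordered[0]] + ordered[3:].
import Mathlib
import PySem

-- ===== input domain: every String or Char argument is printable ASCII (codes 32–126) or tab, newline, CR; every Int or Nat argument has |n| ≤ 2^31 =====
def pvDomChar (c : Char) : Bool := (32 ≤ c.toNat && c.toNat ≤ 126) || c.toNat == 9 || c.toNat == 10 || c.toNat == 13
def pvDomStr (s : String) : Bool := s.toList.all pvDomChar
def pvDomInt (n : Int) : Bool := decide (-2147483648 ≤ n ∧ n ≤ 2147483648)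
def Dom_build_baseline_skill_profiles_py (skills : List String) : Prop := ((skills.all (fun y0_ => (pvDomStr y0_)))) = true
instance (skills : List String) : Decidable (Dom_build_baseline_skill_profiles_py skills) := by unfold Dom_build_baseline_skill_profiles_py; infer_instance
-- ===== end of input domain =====

-- B replaces A's per-index dispatch loop (and the dead `profile or …` fallback) with three
-- direct slices of the deduplicated list; objective: simpler. Equivalence is about the return value.

-- ===== PORT A =====
-- one iteration of A's `for index, skill in enumerate(ordered)` loop body
def pvAStep (st : List String × List String × List String) (p : Int × String) :
    List String × List String × List String :=
  let target_profiles : List Nat :=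
    if p.1 = 0 then [0, 1, 2]
    else if p.1 = 1 ∨ p.1 = 2 then [0, 1]
    else if p.1 = 3 ∨ p.1 = 4 then [0, 2]
    else [2]
  target_profiles.foldl (fun st pi =>
    if pi = 0 then (st.1 ++ [p.2], st.2.1, st.2.2)
    else if pi = 1 then (st.1, st.2.1 ++ [p.2], st.2.2)
    else (st.1, st.2.1, st.2.2 ++ [p.2])) st

def build_baseline_skill_profiles_py (skills : List String) : List (List String) :=
  let ordered := PySem.List.dedup skills
  if ordered = [] then [[], [], []]
  else if ordered.length ≤ 3 then [ordered, ordered, ordered]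
  else
    let profiles := (PySem.List.enumerate ordered 0).foldl pvAStep ([], [], [])
    [profiles.1, profiles.2.1, profiles.2.2].map (fun profile =>
      if profile = [] then PySem.List.slice ordered none (some (min (ordered.length : Int) 4))
      else profile)

-- ===== PORT B =====
-- one iteration of B's dedup loop: (seen, ordered) updated on an unseen skill
def pvBStep (acc : PySem.Set String × List String) (s : String) :
    PySem.Set String × List String :=
  if acc.1.contains s then acc else (acc.1.add s, acc.2 ++ [s])

def build_baseline_skill_profiles_py_alt (skills : List String) : List (List String) :=
  let st := skills.foldl pvBStep (PySem.Set.empty, [])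
  let ordered := st.2
  if ordered = [] then [[], [], []]
  else if ordered.length ≤ 3 then [ordered, ordered, ordered]
  else [PySem.List.slice ordered none (some 5),
        PySem.List.slice ordered none (some 3),
        PySem.List.pyGetD ordered 0 "" :: PySem.List.slice ordered (some 3) none]

-- ===== PRECONDITION & SPEC =====
def Spec_build_baseline_skill_profiles_py (skills : List String) (out : List (List String)) : Prop := out = build_baseline_skill_profiles_py_alt skills
instance (skills : List String) (out : List (List String)) : Decidable (Spec_build_baseline_skill_profiles_py skills out) := by unfold Spec_build_baseline_skill_profiles_py; infer_instance

-- ===== CLAIM (what is proved, stated in full; the proofs are below) =====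
def Claim_equal_build_baseline_skill_profiles_py : Prop := ∀ (skills : List String), Dom_build_baseline_skill_profiles_py skills → Spec_build_baseline_skill_profiles_py skills (build_baseline_skill_profiles_py skills)

-- ===== LEMMAS AND PROOFS =====

-- B's dedup loop carries (seen, ordered) with seen = ordered at every step, so both
-- components equal the foldl of PySem.Set.add, i.e. PySem.List.dedup.
theorem pvBLoop_eq (l : List String) (S : PySem.Set String) :
    l.foldl pvBStep (S, S) = (l.foldl PySem.Set.add S, l.foldl PySem.Set.add S) := by
  induction l generalizing S with
  | nil => rfl
  | cons x t ih =>
    simp only [List.foldl_cons]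
    have hstep : pvBStep (S, S) x = (S.add x, S.add x) := by
      by_cases h : x ∈ S <;> simp [pvBStep, PySem.Set.add, h]
    rw [hstep, ih]

theorem pvOrdered_eq (skills : List String) :
    (skills.foldl pvBStep (PySem.Set.empty, [])).2 = PySem.List.dedup skills := by
  have h : (skills.foldl pvBStep (PySem.Set.empty, PySem.Set.empty)).2
      = PySem.List.dedup skills := by
    rw [pvBLoop_eq]
    rfl
  exact h

-- From index 5 on every iteration of A's loop appends only to profile 2.
theorem pvTail (l : List String) (i : Int) (hi : 5 ≤ i)
    (p0 p1 p2 : List String) :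
    (PySem.List.enumerate l i).foldl pvAStep (p0, p1, p2) = (p0, p1, p2 ++ l) := by
  induction l generalizing i p2 with
  | nil => simp [PySem.List.enumerate_nil]
  | cons x t ih =>
    rw [PySem.List.enumerate_cons, List.foldl_cons]
    have h0 : ¬ (i = 0) := by omega
    have h1 : ¬ (i = 1 ∨ i = 2) := by omega
    have h2 : ¬ (i = 3 ∨ i = 4) := by omega
    simp only [pvAStep, h0, h1, h2, if_false, List.foldl_cons, List.foldl_nil]
    norm_num
    rw [ih (i + 1) (by omega)]
    simp

-- A's loop on a ≥4-element list, computed in closed form.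
theorem pvLoop_closed (a b c d : String) (rest : List String) :
    (PySem.List.enumerate (a :: b :: c :: d :: rest) 0).foldl pvAStep ([], [], [])
      = (a :: b :: c :: d :: rest.take 1, [a, b, c], a :: d :: rest) := by
  rw [PySem.List.enumerate_cons, PySem.List.enumerate_cons,
      PySem.List.enumerate_cons, PySem.List.enumerate_cons]
  norm_num
  cases rest with
  | nil =>
    simp [PySem.List.enumerate_nil, pvAStep]
  | cons e r2 =>
    rw [PySem.List.enumerate_cons]
    simp only [List.foldl_cons]
    have : pvAStep (pvAStep (pvAStep (pvAStep (pvAStep ([], [], []) (0, a)) (1, b)) (2, c)) (3, d)) (4, e)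
        = ([a, b, c, d, e], [a, b, c], [a, d, e]) := by
      simp [pvAStep]
    rw [this, pvTail r2 (4 + 1) (by omega)]
    simp

-- ===== VERDICT (by name: the statement is the Claim_ definition above) =====
theorem build_baseline_skill_profiles_py_spec : Claim_equal_build_baseline_skill_profiles_py := by
  intro skills _
  show build_baseline_skill_profiles_py skills = build_baseline_skill_profiles_py_alt skills
  simp only [build_baseline_skill_profiles_py, build_baseline_skill_profiles_py_alt]
  rw [pvOrdered_eq skills]
  cases h : PySem.List.dedup skills with
  | nil => simp
  | cons a t =>
    cases t with
    | nil => simp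
    | cons b t2 =>
      cases t2 with
      | nil => simp
      | cons c t3 =>
        cases t3 with
        | nil => simp
        | cons d rest =>
          have h5 : PySem.List.slice (a :: b :: c :: d :: rest) none (some 5)
              = (a :: b :: c :: d :: rest).take 5 := by
            rw [PySem.List.slice_to _ (by norm_num)]
            rfl
          have h3 : PySem.List.slice (a :: b :: c :: d :: rest) none (some 3)
              = (a :: b :: c :: d :: rest).take 3 := by
            rw [PySem.List.slice_to _ (by norm_num)]
            rfl
          have hd : PySem.List.slice (a :: b :: c :: d :: rest) (some 3) none
              = (a :: b :: c :: d :: rest).drop 3 := by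
            rw [PySem.List.slice_from _ (by norm_num)]
            rfl
          rw [pvLoop_closed]
          simp [h5, h3, hd, PySem.List.pyGetD]
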